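-- pv_equiv track=rewrite | github.com/AJBats/saturn-daytona-usa-re | tools/gen_expected.py | build_function_map
-- ===== SOURCE A (Python) =====
-- def build_function_map(sym_funcs, asm_funcs):
--     """Merge function lists from sym table and asm headers, sorted by address.
--
--     Returns a list of (name, address) with duplicates removed, sorted by address.
--     Also returns a dict of name -> address for quick lookup.
--     """
--     seen_addrs = {}
--     for name, addr in sym_funcs:
--         if addr not in seen_addrs:
--             seen_addrs[addr] = name
--     for name, addr in asm_funcs:
--         if addr not in seen_addrs:
--             seen_addrs[addr] = name
--
--     all_funcs = [(name, addr) for addr, name in seen_addrs.items()]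
--     all_funcs.sort(key=lambda x: x[1])
--
--     name_to_addr = {name: addr for name, addr in all_funcs}
--     return all_funcs, name_to_addr
-- ===== SOURCE B (Python) =====
-- def build_function_map(sym_funcs, asm_funcs):
--     """Merge function lists from sym table and asm headers, sorted by address.
--
--     Stable-sorts the concatenation by address, then keeps only the first
--     entry of each run of equal addresses (sym entries win ties over asm,
--     and earlier entries win within each list, exactly as A's first-wins dict).
--     """
--     combined = list(sym_funcs) + list(asm_funcs)
--     combined.sort(key=lambda x: x[1])  # stable: equal addresses keep input order
--     all_funcs = []
--     for name, addr in combined: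
--         if not all_funcs or addr != all_funcs[-1][1]:
--             all_funcs.append((name, addr))
--     name_to_addr = {name: addr for name, addr in all_funcs}
--     return all_funcs, name_to_addr
-- ===== Notes on version B (the rewrite author's own statement) =====
-- stated objective: alternative
-- what changed: B concatenates both lists, stably sorts the concatenation by address and keeps only the first entry of each run of equal addresses, instead of A's two first-wins dict-building passes followed by sorting the dict's items.
import Mathlib
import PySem

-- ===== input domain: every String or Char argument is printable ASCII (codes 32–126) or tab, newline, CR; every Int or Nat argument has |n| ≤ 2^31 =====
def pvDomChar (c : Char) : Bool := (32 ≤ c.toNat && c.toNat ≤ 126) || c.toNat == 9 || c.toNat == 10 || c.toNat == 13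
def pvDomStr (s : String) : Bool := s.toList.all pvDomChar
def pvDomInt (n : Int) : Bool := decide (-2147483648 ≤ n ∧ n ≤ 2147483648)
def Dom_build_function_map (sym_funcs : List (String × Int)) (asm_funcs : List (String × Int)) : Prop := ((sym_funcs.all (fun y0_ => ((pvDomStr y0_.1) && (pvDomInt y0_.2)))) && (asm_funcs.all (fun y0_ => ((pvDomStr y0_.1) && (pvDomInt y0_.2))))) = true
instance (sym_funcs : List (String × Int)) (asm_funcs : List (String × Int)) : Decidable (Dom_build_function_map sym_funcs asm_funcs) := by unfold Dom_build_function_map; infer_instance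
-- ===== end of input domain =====

-- B replaces A's two first-wins dict passes + sort of the dict items by one stable sort of the
-- concatenation followed by keeping the first entry of each run of equal addresses (alternative
-- decomposition, similar cost); proved to return exactly A's value on all inputs.


-- ===== PORT A =====
def build_function_map (sym_funcs : List (String × Int)) (asm_funcs : List (String × Int)) : (List (String × Int)) × (List (String × Int)) :=
  let seen1 : PySem.Dict Int String :=
    sym_funcs.foldl (fun d p => if d.contains p.2 then d else d.insert p.2 p.1) PySem.Dict.empty
  let seen : PySem.Dict Int String :=
    asm_funcs.foldl (fun d p => if d.contains p.2 then d else d.insert p.2 p.1) seen1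
  let all0 : List (String × Int) := seen.items.map (fun p => (p.2, p.1))
  let all_funcs := PySem.List.sorted all0 (fun x => x.2) false
  let name_to_addr : PySem.Dict String Int :=
    all_funcs.foldl (fun d p => d.insert p.1 p.2) PySem.Dict.empty
  (all_funcs, name_to_addr.items)

-- ===== PORT B =====
-- one loop step of B's keep-first-of-run pass ('if not all_funcs or addr != all_funcs[-1][1]')
def bfmStep (acc : List (String × Int)) (p : String × Int) : List (String × Int) :=
  match acc.getLast? with
  | none => acc ++ [p]
  | some q => if p.2 ≠ q.2 then acc ++ [p] else acc

def build_function_map_alt (sym_funcs : List (String × Int)) (asm_funcs : List (String × Int)) : (List (String × Int)) × (List (String × Int)) :=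
  let combined := PySem.List.sorted (sym_funcs ++ asm_funcs) (fun x => x.2) false
  let all_funcs := combined.foldl bfmStep []
  let name_to_addr : PySem.Dict String Int :=
    all_funcs.foldl (fun d p => d.insert p.1 p.2) PySem.Dict.empty
  (all_funcs, name_to_addr.items)

-- ===== PRECONDITION & SPEC =====
def Spec_build_function_map (sym_funcs : List (String × Int)) (asm_funcs : List (String × Int)) (out : (List (String × Int)) × (List (String × Int))) : Prop := out = build_function_map_alt sym_funcs asm_funcs
instance (sym_funcs : List (String × Int)) (asm_funcs : List (String × Int)) (out : (List (String × Int)) × (List (String × Int))) : Decidable (Spec_build_function_map sym_funcs asm_funcs out) := by unfold Spec_build_function_map; infer_instance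

-- ===== CLAIM (what is proved, stated in full; the proofs are below) =====
def Claim_equal_build_function_map : Prop := ∀ (sym_funcs : List (String × Int)) (asm_funcs : List (String × Int)), Dom_build_function_map sym_funcs asm_funcs → Spec_build_function_map sym_funcs asm_funcs (build_function_map sym_funcs asm_funcs)

-- ===== LEMMAS AND PROOFS =====

-- recursive form of B's keep-first-of-run pass, carrying the address of the last kept entry
def dedupRec (last : Option Int) : List (String × Int) → List (String × Int)
  | [] => []
  | p :: rest => if last = some p.2 then dedupRec last rest else p :: dedupRec (some p.2) rest

-- B's foldl loop is dedupRec on the last kept address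
theorem foldl_bfmStep (l : List (String × Int)) : ∀ acc,
    l.foldl bfmStep acc = acc ++ dedupRec ((acc.getLast?).map (·.2)) l := by
  induction l with
  | nil => intro acc; simp [dedupRec]
  | cons p rest ih =>
    intro acc
    rw [List.foldl_cons, ih]
    cases hacc : acc.getLast? with
    | none =>
      have : acc = [] := List.getLast?_eq_none_iff.mp hacc
      subst this
      simp [bfmStep, dedupRec]
    | some q =>
      simp only [bfmStep, hacc, Option.map_some]
      by_cases h : p.2 = q.2
      · simp [dedupRec, h, hacc]
      · simp [dedupRec, h, hacc, Ne.symm h]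

-- on a list nondecreasing in address, dedupRec is strictly increasing in address and keeps
-- exactly the first entry of each address
theorem dedupRec_props (l : List (String × Int)) : ∀ (last : Option Int),
    l.Pairwise (fun p q => p.2 ≤ q.2) →
    (∀ a, last = some a → ∀ p ∈ l, a ≤ p.2) →
    ((dedupRec last l).Pairwise (fun p q => p.2 < q.2) ∧
     (∀ a, last = some a → ∀ p ∈ dedupRec last l, a < p.2) ∧
     (∀ p, p ∈ dedupRec last l ↔
        last ≠ some p.2 ∧ l.find? (fun q => decide (q.2 = p.2)) = some p)) := by
  induction l with
  | nil => intro last _ _; simp [dedupRec]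
  | cons q rest ih =>
    intro last hpw hinv
    have hpw' := (List.pairwise_cons.mp hpw).2
    have hq := (List.pairwise_cons.mp hpw).1
    by_cases hl : last = some q.2
    · -- skip q
      obtain ⟨a, rfl⟩ : ∃ a, last = some a := ⟨q.2, hl⟩
      have ha : a = q.2 := by simpa using hl
      subst ha
      have hinv' : ∀ a', some q.2 = some a' → ∀ p ∈ rest, a' ≤ p.2 := by
        intro a' h p hp; cases h; exact hq p hp
      obtain ⟨h1, h2, h3⟩ := ih (some q.2) hpw' hinv'
      refine ⟨by simpa [dedupRec] using h1, ?_, ?_⟩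
      · intro a h p hp; cases h
        exact h2 _ rfl p (by simpa [dedupRec] using hp)
      · intro p
        rw [show dedupRec (some q.2) (q :: rest) = dedupRec (some q.2) rest by simp [dedupRec]]
        rw [h3 p]
        by_cases hpq : q.2 = p.2
        · constructor
          · rintro ⟨h, _⟩; exact absurd (by rw [hpq]) h
          · rintro ⟨h, _⟩; exact absurd (by rw [hpq]) h
        · simp [List.find?, hpq]
    · -- keep q
      have hinv' : ∀ a', some q.2 = some a' → ∀ p ∈ rest, a' ≤ p.2 := by
        intro a' h p hp; cases h; exact hq p hp
      obtain ⟨h1, h2, h3⟩ := ih (some q.2) hpw' hinv'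
      have hres : dedupRec last (q :: rest) = q :: dedupRec (some q.2) rest := by
        simp [dedupRec, hl]
      refine ⟨?_, ?_, ?_⟩
      · rw [hres]
        exact List.pairwise_cons.mpr ⟨fun p hp => h2 _ rfl p hp, h1⟩
      · intro a h p hp; cases h
        rw [hres] at hp
        have haq : a < q.2 := by
          rcases lt_or_eq_of_le (hinv _ rfl q (List.mem_cons_self)) with h' | h'
          · exact h'
          · exact absurd (by rw [h']) hl
        rcases List.mem_cons.mp hp with h' | hp'
        · rw [h']; exact haq
        · exact lt_trans haq (h2 _ rfl p hp')
      · intro p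
        rw [hres]
        by_cases hpq : q.2 = p.2
        · constructor
          · intro hp
            rcases List.mem_cons.mp hp with rfl | hp'
            · exact ⟨hl, by simp [List.find?]⟩
            · have := (h3 p).mp hp'
              exact absurd (by rw [hpq]) this.1
          · rintro ⟨_, hf⟩
            have : q = p := by
              simp only [List.find?, hpq, decide_true] at hf
              exact Option.some_inj.mp hf
            simp [this]
        · constructor
          · intro hp
            rcases List.mem_cons.mp hp with rfl | hp'
            · exact absurd rfl hpq
            · obtain ⟨hne, hf⟩ := (h3 p).mp hp'
              refine ⟨?_, by simp [List.find?, hpq, hf]⟩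
              intro hcontra
              obtain ⟨a, rfl⟩ : ∃ a, last = some a := by
                cases last with
                | none => simp at hcontra
                | some a => exact ⟨a, rfl⟩
              have hap : a = p.2 := by simpa using hcontra
              have haq : a ≤ q.2 := hinv _ rfl q List.mem_cons_self
              have hmem : p ∈ rest := List.mem_of_find?_eq_some hf
              have hqp : q.2 ≤ p.2 := hq p hmem
              have : a = q.2 := le_antisymm haq (hap ▸ hqp)
              exact hl (by rw [this])
          · rintro ⟨hne, hf⟩
            right
            apply (h3 p).mpr
            exact ⟨by simpa using hpq, by simpa [List.find?, hpq] using hf⟩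

-- A's first-wins dict lookup is the first occurrence in the traversed list
theorem get?_firstWins (l : List (String × Int)) : ∀ (d : PySem.Dict Int String) (a : Int),
    (l.foldl (fun d p => if d.contains p.2 then d else d.insert p.2 p.1) d).get? a
      = (d.get? a).or ((l.find? (fun q => decide (q.2 = a))).map (·.1)) := by
  induction l with
  | nil => intro d a; simp
  | cons p rest ih =>
    intro d a
    rw [List.foldl_cons, ih]
    by_cases hc : d.contains p.2
    · simp only [hc, if_true]
      by_cases hpa : p.2 = a
      · subst hpa
        have hs : (d.get? p.2).isSome := by rw [← PySem.Dict.contains_eq_isSome_get?, hc]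
        obtain ⟨v, hv⟩ := Option.isSome_iff_exists.mp hs
        simp [List.find?, hv]
      · simp [List.find?, hpa]
    · simp only [hc, if_false, Bool.false_eq_true]
      by_cases hpa : p.2 = a
      · subst hpa
        have hn : d.get? p.2 = none := by
          cases h : d.get? p.2 with
          | none => rfl
          | some v => rw [PySem.Dict.contains_eq_isSome_get?, h] at hc; simp at hc
        simp [List.find?, hn]
      · rw [PySem.Dict.get?_insert]
        simp [List.find?, hpa, Ne.symm hpa]

theorem nodup_keys_firstWins (l : List (String × Int)) : ∀ (d : PySem.Dict Int String),
    d.keys.Nodup →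
    (l.foldl (fun d p => if d.contains p.2 then d else d.insert p.2 p.1) d).keys.Nodup := by
  induction l with
  | nil => intro d h; simpa
  | cons p rest ih =>
    intro d h
    rw [List.foldl_cons]
    apply ih
    by_cases hc : d.contains p.2
    · simpa [hc]
    · simp only [hc, if_false, Bool.false_eq_true]
      exact PySem.Dict.nodup_keys_insert d p.2 p.1 h

-- stability of the sort: the entries at a fixed address appear in input order
theorem filter_insertBy (x : String × Int) (ys : List (String × Int)) (a : Int)
    (hpw : ys.Pairwise (fun p q => p.2 ≤ q.2)) :
    (PySem.List.insertBy (fun p q => decide (p.2 < q.2)) x ys).filter (fun q => decide (q.2 = a))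
      = if x.2 = a then ys.filter (fun q => decide (q.2 = a)) ++ [x]
        else ys.filter (fun q => decide (q.2 = a)) := by
  induction ys with
  | nil => by_cases h : x.2 = a <;> simp [PySem.List.insertBy, List.filter, h]
  | cons y t ih =>
    have hpw' := (List.pairwise_cons.mp hpw).2
    have hy := (List.pairwise_cons.mp hpw).1
    by_cases hb : x.2 < y.2
    · rw [show PySem.List.insertBy (fun p q => decide (p.2 < q.2)) x (y :: t) = x :: y :: t by
        simp [PySem.List.insertBy, hb]]
      by_cases h : x.2 = a
      · have hall : (y :: t).filter (fun q => decide (q.2 = a)) = [] := by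
          rw [List.filter_eq_nil_iff]
          intro q hq
          have : y.2 ≤ q.2 := by
            rcases List.mem_cons.mp hq with h' | h'
            · rw [h']
            · exact hy q h'
          have : a < q.2 := lt_of_lt_of_le (h ▸ hb) this
          simp; omega
        rw [List.filter_cons_of_pos (by simp [h]), hall]
        simp [h]
      · rw [List.filter_cons_of_neg (by simp [h])]
        simp [h]
    · rw [show PySem.List.insertBy (fun p q => decide (p.2 < q.2)) x (y :: t)
          = y :: PySem.List.insertBy (fun p q => decide (p.2 < q.2)) x t by
        simp [PySem.List.insertBy, hb]]
      by_cases h : x.2 = a <;>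
        by_cases hya : y.2 = a <;>
          simp [List.filter, hya, ih hpw', h]

theorem filter_sorted_snd (l : List (String × Int)) (a : Int) :
    (PySem.List.sorted l (fun x => x.2) false).filter (fun q => decide (q.2 = a))
      = l.filter (fun q => decide (q.2 = a)) := by
  induction l using List.reverseRecOn with
  | nil => simp
  | append_singleton t x ih =>
    have hstep : PySem.List.sorted (t ++ [x]) (fun x => x.2) false
        = PySem.List.insertBy (fun p q => decide (p.2 < q.2)) x (PySem.List.sorted t (fun x => x.2) false) := by
      rw [PySem.List.sorted_eq_foldl_insertBy, PySem.List.sorted_eq_foldl_insertBy, List.foldl_append]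
      rfl
    rw [hstep, filter_insertBy x _ a (PySem.List.sorted_pairwise t (fun x => x.2)), List.filter_append]
    by_cases h : x.2 = a <;> simp [h, ih, List.filter]

theorem find?_sorted_snd (l : List (String × Int)) (a : Int) :
    (PySem.List.sorted l (fun x => x.2) false).find? (fun q => decide (q.2 = a))
      = l.find? (fun q => decide (q.2 = a)) := by
  rw [← List.head?_filter, ← List.head?_filter, filter_sorted_snd]

theorem build_eq (sym_funcs asm_funcs : List (String × Int)) :
    build_function_map sym_funcs asm_funcs = build_function_map_alt sym_funcs asm_funcs := by
  unfold build_function_map build_function_map_alt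
  dsimp only
  rw [← List.foldl_append]
  set combined := sym_funcs ++ asm_funcs with hcomb
  set seen := combined.foldl (fun d p => if d.contains p.2 then d else d.insert p.2 p.1) PySem.Dict.empty with hseen
  set S := PySem.List.sorted combined (fun x => x.2) false with hS
  set LA := seen.items.map (fun p => (p.2, p.1)) with hLA
  have hb : S.foldl bfmStep [] = dedupRec none S := by
    simpa using foldl_bfmStep S []
  obtain ⟨h1, -, h3⟩ := dedupRec_props S none (PySem.List.sorted_pairwise combined (fun x => x.2)) (by simp)
  have hk : seen.keys.Nodup := nodup_keys_firstWins combined PySem.Dict.empty (by simp)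
  have hget : ∀ a, seen.get? a = ((combined.find? (fun q => decide (q.2 = a))).map (·.1)) := by
    intro a; rw [hseen, get?_firstWins]; simp
  have memLA : ∀ p : String × Int, p ∈ LA ↔ combined.find? (fun q => decide (q.2 = p.2)) = some p := by
    intro p
    rw [hLA, List.mem_map]
    constructor
    · rintro ⟨r, hr, hrp⟩
      have hr' : (p.2, p.1) ∈ seen.items := by
        have : r = (p.2, p.1) := by rw [← hrp]
        rwa [this] at hr
      have hg : seen.get? p.2 = some p.1 :=
        (PySem.Dict.get?_eq_some_iff_mem_items seen p.2 p.1 hk).mpr hr'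
      rw [hget] at hg
      cases hf : combined.find? (fun q => decide (q.2 = p.2)) with
      | none => rw [hf] at hg; simp at hg
      | some q =>
        rw [hf] at hg
        have hq1 : q.1 = p.1 := by simpa using hg
        have hq2 : q.2 = p.2 := by simpa using List.find?_some hf
        congr 1
        exact Prod.ext hq1 hq2
    · intro hf
      refine ⟨(p.2, p.1), ?_, rfl⟩
      apply (PySem.Dict.get?_eq_some_iff_mem_items seen p.2 p.1 hk).mp
      rw [hget, hf]
      rfl
  have memLB : ∀ p : String × Int, p ∈ dedupRec none S ↔ combined.find? (fun q => decide (q.2 = p.2)) = some p := by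
    intro p
    rw [h3 p, find?_sorted_snd]
    simp
  have nodupLB : (dedupRec none S).Nodup :=
    h1.imp (fun {a b} h => fun heq => absurd (congrArg Prod.snd heq) (ne_of_lt h))
  have nodupLA : LA.Nodup := by
    have hitems : seen.items.Nodup := by
      have : (seen.items.map (·.1)).Nodup := hk
      exact this.of_map
    exact hitems.map (fun a b h => by
      have h1 := congrArg Prod.fst h
      have h2 := congrArg Prod.snd h
      exact Prod.ext h2 h1)
  have hperm : (dedupRec none S).Perm LA :=
    (List.perm_ext_iff_of_nodup nodupLB nodupLA).mpr (fun p => by rw [memLB p, memLA p])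
  have hfst : PySem.List.sorted LA (fun x => x.2) false = dedupRec none S :=
    PySem.List.sorted_eq_of_perm_of_pairwise_lt LA (dedupRec none S) (fun x => x.2) hperm h1
  rw [hb, hfst]

-- ===== VERDICT (by name: the statement is the Claim_ definition above) =====
theorem build_function_map_spec : Claim_equal_build_function_map := by
  intro sym_funcs asm_funcs _
  unfold Spec_build_function_map
  exact build_eq sym_funcs asm_funcs
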